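-- pv_equiv track=rewrite | github.com/alimtvnetwork/core-v8 | scripts/aaa_comments.py | find_section_boundaries
-- ===== SOURCE A (Python) =====
-- def find_section_boundaries(body_lines: list[str]) -> tuple:
--     """
--     Find where Arrange ends, Act starts/ends, Assert starts.
--     Returns (arrange_end, act_start, assert_start) as line indices within body_lines.
--     Returns None if sections can't be determined.
--     """
--     n = len(body_lines)
--     if n == 0:
--         return None
--
--     # Find the first 'actual := args.Map' or 'actual :=' line
--     act_start = -1
--     for i, line in enumerate(body_lines):
--         s = line.strip()
--         if s.startswith('actual') and ':=' in s:
--             act_start = i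
--             break
--
--     # Find the first 'expected' line or ShouldBeEqual
--     assert_start = -1
--     for i, line in enumerate(body_lines):
--         s = line.strip()
--         if (s.startswith('expected') and ':=' in s) or '.ShouldBeEqual' in s or '.ShouldBeEqualMap' in s:
--             assert_start = i
--             break
--
--     # For loop-based tests with testCase.ShouldBeEqualMap
--     if assert_start == -1:
--         for i, line in enumerate(body_lines):
--             s = line.strip()
--             if 'ShouldBeEqualMap' in s or 'ShouldBeSafe' in s:
--                 assert_start = i
--                 break
--
--     return act_start, assert_start
-- ===== SOURCE B (Python) =====
-- def find_section_boundaries(body_lines: list[str]) -> tuple: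
--     """Single pass over body_lines maintaining three first-match indices."""
--     if not body_lines:
--         return None
--     act = ap = af = -1
--     for i, line in enumerate(body_lines):
--         s = line.strip()
--         if act == -1 and s.startswith('actual') and ':=' in s:
--             act = i
--         if ap == -1 and ((s.startswith('expected') and ':=' in s)
--                          or '.ShouldBeEqual' in s or '.ShouldBeEqualMap' in s):
--             ap = i
--         if af == -1 and ('ShouldBeEqualMap' in s or 'ShouldBeSafe' in s):
--             af = i
--     return act, (ap if ap != -1 else af)
-- ===== Notes on version B (the rewrite author's own statement) =====
-- stated objective: alternative
-- what changed: Replaces A's three sequential first-match scans (up to three full passes) by one single loop that maintains three first-match indices and resolves the primary-vs-fallback assert precedence after the loop.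
import Mathlib
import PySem

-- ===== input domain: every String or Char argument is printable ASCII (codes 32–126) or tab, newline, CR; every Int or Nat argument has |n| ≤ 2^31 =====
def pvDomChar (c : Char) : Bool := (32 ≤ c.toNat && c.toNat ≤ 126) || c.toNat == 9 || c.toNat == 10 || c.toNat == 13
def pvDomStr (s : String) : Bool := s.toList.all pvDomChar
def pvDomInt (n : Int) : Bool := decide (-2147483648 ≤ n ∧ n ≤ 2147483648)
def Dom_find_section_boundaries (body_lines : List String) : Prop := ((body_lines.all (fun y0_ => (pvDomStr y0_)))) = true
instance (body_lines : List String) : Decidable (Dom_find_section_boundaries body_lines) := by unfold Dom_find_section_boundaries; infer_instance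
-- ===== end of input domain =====

-- B merges A's three sequential first-match scans into one loop over the lines,
-- keeping three indices and resolving the assert primary/fallback precedence at the end.

-- ===== PORT A =====
-- the three line predicates of A (identical text in both Pythons)
def pvActP (s : String) : Bool := PySem.Str.startswith s "actual" && PySem.Str.isIn ":=" s
def pvAssertP (s : String) : Bool :=
  (PySem.Str.startswith s "expected" && PySem.Str.isIn ":=" s)
  || PySem.Str.isIn ".ShouldBeEqual" s || PySem.Str.isIn ".ShouldBeEqualMap" s
def pvFallbackP (s : String) : Bool :=
  PySem.Str.isIn "ShouldBeEqualMap" s || PySem.Str.isIn "ShouldBeSafe" s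

-- 'for i, line in enumerate(...): if p(line.strip()): result = i; break' with result initialized to -1
def pvScanFirst (p : String → Bool) : List (Int × String) → Int
  | [] => -1
  | (i, line) :: rest => if p (PySem.Str.strip line) then i else pvScanFirst p rest

def find_section_boundaries (body_lines : List String) : Option (Int × Int) :=
  let n : Int := body_lines.length
  if n == 0 then none
  else
    let act_start := pvScanFirst pvActP (PySem.List.enumerate body_lines)
    let assert_start := pvScanFirst pvAssertP (PySem.List.enumerate body_lines)
    let assert_start :=
      if assert_start == -1 then pvScanFirst pvFallbackP (PySem.List.enumerate body_lines)
      else assert_start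
    some (act_start, assert_start)

-- ===== PORT B =====
def find_section_boundaries_alt (body_lines : List String) : Option (Int × Int) :=
  if body_lines.isEmpty then none
  else
    let st := (PySem.List.enumerate body_lines).foldl
      (fun (st : Int × Int × Int) (q : Int × String) =>
        let s := PySem.Str.strip q.2
        let act := if st.1 == -1 && pvActP s then q.1 else st.1
        let ap := if st.2.1 == -1 && pvAssertP s then q.1 else st.2.1
        let af := if st.2.2 == -1 && pvFallbackP s then q.1 else st.2.2
        (act, ap, af))
      (-1, -1, -1)
    some (st.1, if st.2.1 != -1 then st.2.1 else st.2.2)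

-- ===== PRECONDITION & SPEC =====
def Spec_find_section_boundaries (body_lines : List String) (out : Option (Int × Int)) : Prop := out = find_section_boundaries_alt body_lines
instance (body_lines : List String) (out : Option (Int × Int)) : Decidable (Spec_find_section_boundaries body_lines out) := by unfold Spec_find_section_boundaries; infer_instance

-- ===== CLAIM (what is proved, stated in full; the proofs are below) =====
def Claim_equal_find_section_boundaries : Prop := ∀ (body_lines : List String), Dom_find_section_boundaries body_lines → Spec_find_section_boundaries body_lines (find_section_boundaries body_lines)

-- ===== LEMMAS AND PROOFS =====

-- the triple fold splits into three independent single folds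
lemma fold_triple (l : List (Int × String)) (st : Int × Int × Int) :
    l.foldl
      (fun (st : Int × Int × Int) (q : Int × String) =>
        let s := PySem.Str.strip q.2
        let act := if st.1 == -1 && pvActP s then q.1 else st.1
        let ap := if st.2.1 == -1 && pvAssertP s then q.1 else st.2.1
        let af := if st.2.2 == -1 && pvFallbackP s then q.1 else st.2.2
        (act, ap, af)) st
    = (l.foldl (fun a q => if a == -1 && pvActP (PySem.Str.strip q.2) then q.1 else a) st.1,
       l.foldl (fun a q => if a == -1 && pvAssertP (PySem.Str.strip q.2) then q.1 else a) st.2.1,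
       l.foldl (fun a q => if a == -1 && pvFallbackP (PySem.Str.strip q.2) then q.1 else a) st.2.2) := by
  induction l generalizing st with
  | nil => rfl
  | cons q rest ih => rw [List.foldl_cons, ih]; rfl

-- a "first match wins" fold equals the break-scan when all indices are nonnegative
lemma fold_first (p : String → Bool) (l : List (Int × String))
    (h : ∀ q ∈ l, 0 ≤ q.1) (st : Int) :
    l.foldl (fun a q => if a == -1 && p (PySem.Str.strip q.2) then q.1 else a) st
    = if st == -1 then pvScanFirst p l else st := by
  induction l generalizing st with
  | nil => simp [pvScanFirst]
  | cons q rest ih =>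
    obtain ⟨i, line⟩ := q
    have hq : (0 : Int) ≤ i := h (i, line) (List.mem_cons_self ..)
    have hrest : ∀ r ∈ rest, 0 ≤ r.1 := fun r hr => h r (List.mem_cons_of_mem _ hr)
    have hine : (i == (-1 : Int)) = false := by
      rw [beq_eq_false_iff_ne]; omega
    rw [List.foldl_cons, ih hrest]
    by_cases hst : st = -1
    · subst hst
      by_cases hp : p (PySem.Str.strip line) = true
      · simp [hp, hine, pvScanFirst]
      · rw [Bool.not_eq_true] at hp
        simp [hp, pvScanFirst]
    · have hne : (st == (-1 : Int)) = false := by rw [beq_eq_false_iff_ne]; exact hst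
      simp [hne]

lemma enum_nonneg (body_lines : List String) :
    ∀ q ∈ PySem.List.enumerate body_lines, 0 ≤ q.1 := by
  intro q hq
  rw [PySem.List.mem_enumerate_iff] at hq
  obtain ⟨k, hk, rfl⟩ := hq
  simp

lemma alt_eq (body_lines : List String) :
    find_section_boundaries_alt body_lines =
      if body_lines.isEmpty then none
      else some (pvScanFirst pvActP (PySem.List.enumerate body_lines),
        if (pvScanFirst pvAssertP (PySem.List.enumerate body_lines)) != -1 then
          pvScanFirst pvAssertP (PySem.List.enumerate body_lines)
        else pvScanFirst pvFallbackP (PySem.List.enumerate body_lines)) := by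
  have hnn := enum_nonneg body_lines
  unfold find_section_boundaries_alt
  rw [fold_triple]
  rw [fold_first pvActP _ hnn, fold_first pvAssertP _ hnn, fold_first pvFallbackP _ hnn]
  rfl

-- ===== VERDICT (by name: the statement is the Claim_ definition above) =====
theorem find_section_boundaries_spec : Claim_equal_find_section_boundaries := by
  intro body_lines _
  unfold Spec_find_section_boundaries
  rw [alt_eq]
  cases body_lines with
  | nil => rfl
  | cons x xs =>
    have hlen : ((((x :: xs).length : Int)) == 0) = false := by
      rw [beq_eq_false_iff_ne, List.length_cons]; push_cast; omega
    unfold find_section_boundaries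
    simp only [hlen, Bool.false_eq_true, if_false, List.isEmpty_cons, Option.some.injEq,
      Prod.mk.injEq, true_and]
    generalize pvScanFirst pvAssertP (PySem.List.enumerate (x :: xs)) = v
    generalize pvScanFirst pvFallbackP (PySem.List.enumerate (x :: xs)) = w
    by_cases h : v = -1 <;> simp [bne, h]
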